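-- pv_equiv track=rewrite | github.com/bhaiyatu/portfolio | bleach-dle-python/app.py | check_array_match
-- ===== SOURCE A (Python) =====
-- def check_array_match(guessed_array, target_array):
--     """Check if arrays match fully, partially, or not at all."""
--     if not guessed_array and not target_array:
--         return {'result': 'match', 'type': 'full'}
--     if not guessed_array or not target_array:
--         return {'result': 'no-match', 'type': 'none'}
--
--     has_full_match = len(guessed_array) == len(target_array) and all(item in target_array for item in guessed_array)
--     has_partial_match = any(item in target_array for item in guessed_array)
--
--     if has_full_match:
--         return {'result': 'match', 'type': 'full'}
--     elif has_partial_match: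
--         return {'result': 'partial-match', 'type': 'partial'}
--     return {'result': 'no-match', 'type': 'none'}
-- ===== SOURCE B (Python) =====
-- def check_array_match(guessed_array, target_array):
--     """Check if arrays match fully, partially, or not at all."""
--     if not guessed_array and not target_array:
--         return {'result': 'match', 'type': 'full'}
--     if not guessed_array or not target_array:
--         return {'result': 'no-match', 'type': 'none'}
--
--     g = sorted(set(guessed_array))
--     t = sorted(set(target_array))
--     i = j = 0
--     subset, common = True, False
--     while i < len(g) and j < len(t):
--         if g[i] == t[j]:
--             common = True
--             i += 1
--             j += 1
--         elif g[i] < t[j]: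
--             subset = False
--             i += 1
--         else:
--             j += 1
--     if i < len(g):
--         subset = False
--
--     if subset and len(guessed_array) == len(target_array):
--         return {'result': 'match', 'type': 'full'}
--     if common:
--         return {'result': 'partial-match', 'type': 'partial'}
--     return {'result': 'no-match', 'type': 'none'}
-- ===== Notes on version B (the rewrite author's own statement) =====
-- stated objective: alternative
-- what changed: Replaces A's quadratic membership passes (all()/any() each scanning target_array) with a sort-then-merge algorithm: sort the deduplicated arrays and run a single two-pointer merge that decides subset and non-empty-intersection in one linear sweep.
import Mathlib
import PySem

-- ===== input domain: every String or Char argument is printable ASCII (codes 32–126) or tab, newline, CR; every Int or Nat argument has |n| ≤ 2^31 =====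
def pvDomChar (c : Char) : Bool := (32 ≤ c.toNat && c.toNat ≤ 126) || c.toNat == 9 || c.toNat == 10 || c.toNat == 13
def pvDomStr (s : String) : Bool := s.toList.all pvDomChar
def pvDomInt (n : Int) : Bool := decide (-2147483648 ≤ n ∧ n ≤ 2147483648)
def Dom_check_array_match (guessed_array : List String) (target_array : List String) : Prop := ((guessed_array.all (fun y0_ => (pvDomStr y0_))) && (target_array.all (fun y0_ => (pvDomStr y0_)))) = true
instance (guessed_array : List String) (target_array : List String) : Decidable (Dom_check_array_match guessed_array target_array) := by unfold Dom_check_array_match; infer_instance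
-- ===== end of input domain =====

-- B replaces A's two membership passes (all()/any(), each scanning target_array) with a
-- sort-then-merge: sort both deduplicated arrays and decide subset / non-empty intersection
-- in one two-pointer sweep (objective: alternative).

-- ===== PORT A =====
def check_array_match (guessed_array : List String) (target_array : List String) : List (String × String) :=
  if guessed_array = [] ∧ target_array = [] then [("result", "match"), ("type", "full")]
  else if guessed_array = [] ∨ target_array = [] then [("result", "no-match"), ("type", "none")]
  else
    let has_full_match : Bool :=
      (guessed_array.length == target_array.length) &&
        guessed_array.all (fun item => target_array.contains item)
    let has_partial_match : Bool :=
      guessed_array.any (fun item => target_array.contains item)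
    if has_full_match then [("result", "match"), ("type", "full")]
    else if has_partial_match then [("result", "partial-match"), ("type", "partial")]
    else [("result", "no-match"), ("type", "none")]

-- ===== PORT B =====
-- Source B's while loop over the two sorted suffixes, as structural recursion on those suffixes;
-- returns (subset, common) exactly as the loop leaves them (including the trailing
-- 'if i < len(g): subset = False' for a leftover guessed suffix).
def pvMergeScan : List String → List String → Bool × Bool
  | [], _ => (true, false)
  | _ :: _, [] => (false, false)
  | x :: xs, y :: ys =>
    if x = y then ((pvMergeScan xs ys).1, true)
    else if x < y then (false, (pvMergeScan xs (y :: ys)).2)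
    else pvMergeScan (x :: xs) ys
termination_by xs ys => xs.length + ys.length
decreasing_by all_goals (simp only [List.length_cons]; omega)

def check_array_match_alt (guessed_array : List String) (target_array : List String) : List (String × String) :=
  if guessed_array = [] ∧ target_array = [] then [("result", "match"), ("type", "full")]
  else if guessed_array = [] ∨ target_array = [] then [("result", "no-match"), ("type", "none")]
  else
    let g := PySem.List.sorted (PySem.Set.ofList guessed_array) (fun x => x) false
    let t := PySem.List.sorted (PySem.Set.ofList target_array) (fun x => x) false
    let sc := pvMergeScan g t
    if sc.1 ∧ guessed_array.length = target_array.length then [("result", "match"), ("type", "full")]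
    else if sc.2 then [("result", "partial-match"), ("type", "partial")]
    else [("result", "no-match"), ("type", "none")]

-- ===== PRECONDITION & SPEC =====
def Spec_check_array_match (guessed_array : List String) (target_array : List String) (out : List (String × String)) : Prop := out = check_array_match_alt guessed_array target_array
instance (guessed_array : List String) (target_array : List String) (out : List (String × String)) : Decidable (Spec_check_array_match guessed_array target_array out) := by unfold Spec_check_array_match; infer_instance

-- ===== CLAIM (what is proved, stated in full; the proofs are below) =====
def Claim_equal_check_array_match : Prop := ∀ (guessed_array : List String) (target_array : List String), Dom_check_array_match guessed_array target_array → Spec_check_array_match guessed_array target_array (check_array_match guessed_array target_array)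

-- ===== LEMMAS AND PROOFS =====

-- On strictly increasing lists, the merge sweep computes (subset, non-empty intersection).
theorem pvMergeScan_spec (xs ys : List String)
    (hx : xs.Pairwise (· < ·)) (hy : ys.Pairwise (· < ·)) :
    pvMergeScan xs ys = (decide (∀ a ∈ xs, a ∈ ys), decide (∃ a ∈ xs, a ∈ ys)) := by
  induction xs, ys using pvMergeScan.induct with
  | case1 ys => simp [pvMergeScan]
  | case2 x xs =>
    rw [pvMergeScan]
    simp only [Prod.mk.injEq]
    refine ⟨?_, ?_⟩
    · symm; rw [decide_eq_false_iff_not]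
      intro h; exact List.not_mem_nil (h x List.mem_cons_self)
    · symm; rw [decide_eq_false_iff_not]
      rintro ⟨a, _, hm⟩; exact List.not_mem_nil hm
  | case3 xs y ys ih =>
    rw [List.pairwise_cons] at hx hy
    rw [pvMergeScan, if_pos rfl, ih hx.2 hy.2]
    simp only [Prod.mk.injEq]
    refine ⟨?_, ?_⟩
    · rw [decide_eq_decide]
      constructor
      · intro h a ha
        rcases List.mem_cons.mp ha with h' | h'
        · exact h' ▸ List.mem_cons_self
        · exact List.mem_cons_of_mem y (h a h')
      · intro h a ha
        rcases List.mem_cons.mp (h a (List.mem_cons_of_mem y ha)) with h' | h'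
        · exact absurd (h' ▸ hx.1 a ha) (lt_irrefl y)
        · exact h'
    · symm; rw [decide_eq_true_iff]
      exact ⟨y, List.mem_cons_self, List.mem_cons_self⟩
  | case4 x xs y ys hne hlt ih =>
    rw [List.pairwise_cons] at hx
    have hy' := List.pairwise_cons.mp hy
    have hxnot : x ∉ y :: ys := by
      intro hm
      rcases List.mem_cons.mp hm with h | h
      · exact hne h
      · exact absurd (hy'.1 x h) (lt_asymm hlt)
    rw [pvMergeScan, if_neg hne, if_pos hlt, ih hx.2 hy]
    simp only [Prod.mk.injEq]
    refine ⟨?_, ?_⟩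
    · symm; rw [decide_eq_false_iff_not]
      intro h; exact hxnot (h x List.mem_cons_self)
    · rw [decide_eq_decide]
      constructor
      · rintro ⟨a, ha, hm⟩; exact ⟨a, List.mem_cons_of_mem x ha, hm⟩
      · rintro ⟨a, ha, hm⟩
        rcases List.mem_cons.mp ha with h | h
        · exact absurd (h ▸ hm) hxnot
        · exact ⟨a, h, hm⟩
  | case5 x xs y ys hne hnlt ih =>
    have hylt : y < x := lt_of_le_of_ne (not_lt.mp hnlt) (fun h => hne h.symm)
    have hy' := List.pairwise_cons.mp hy
    have hmem : ∀ a ∈ x :: xs, (a ∈ y :: ys ↔ a ∈ ys) := by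
      intro a ha
      have hya : y < a := by
        rcases List.mem_cons.mp ha with h | h
        · exact h ▸ hylt
        · exact lt_trans hylt ((List.pairwise_cons.mp hx).1 a h)
      constructor
      · intro hm
        rcases List.mem_cons.mp hm with h | h
        · exact absurd (h ▸ hya) (lt_irrefl a)
        · exact h
      · exact List.mem_cons_of_mem y
    rw [pvMergeScan, if_neg hne, if_neg hnlt, ih hx hy'.2]
    simp only [Prod.mk.injEq]
    refine ⟨?_, ?_⟩
    · rw [decide_eq_decide]
      constructor
      · intro h a ha; exact List.mem_cons_of_mem y (h a ha)
      · intro h a ha; exact (hmem a ha).mp (h a ha)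
    · rw [decide_eq_decide]
      constructor
      · rintro ⟨a, ha, hm⟩; exact ⟨a, ha, List.mem_cons_of_mem y hm⟩
      · rintro ⟨a, ha, hm⟩; exact ⟨a, ha, (hmem a ha).mp hm⟩

-- ===== VERDICT (by name: the statement is the Claim_ definition above) =====
theorem check_array_match_spec : Claim_equal_check_array_match := by
  intro g t _
  unfold Spec_check_array_match check_array_match check_array_match_alt
  by_cases h1 : g = [] ∧ t = []
  · simp [h1]
  · by_cases h2 : g = [] ∨ t = []
    · simp [h1, h2]
    · simp only [h1, h2, if_false]
      rw [pvMergeScan_spec _ _ (PySem.List.sorted_ofList_pairwise_lt g)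
            (PySem.List.sorted_ofList_pairwise_lt t)]
      have hmg : ∀ a : String, a ∈ PySem.List.sorted (PySem.Set.ofList g) (fun x => x) false ↔ a ∈ g := by
        intro a
        rw [PySem.List.mem_sorted]
        exact PySem.Set.mem_ofList g a
      have hmt : ∀ a : String, a ∈ PySem.List.sorted (PySem.Set.ofList t) (fun x => x) false ↔ a ∈ t := by
        intro a
        rw [PySem.List.mem_sorted]
        exact PySem.Set.mem_ofList t a
      have hsub : (∀ a ∈ PySem.List.sorted (PySem.Set.ofList g) (fun x => x) false,
          a ∈ PySem.List.sorted (PySem.Set.ofList t) (fun x => x) false) ↔ ∀ a ∈ g, a ∈ t := by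
        constructor
        · intro h a ha; exact (hmt a).mp (h a ((hmg a).mpr ha))
        · intro h a ha; exact (hmt a).mpr (h a ((hmg a).mp ha))
      have hint : (∃ a ∈ PySem.List.sorted (PySem.Set.ofList g) (fun x => x) false,
          a ∈ PySem.List.sorted (PySem.Set.ofList t) (fun x => x) false) ↔ ∃ a ∈ g, a ∈ t := by
        constructor
        · rintro ⟨a, ha, hb⟩; exact ⟨a, (hmg a).mp ha, (hmt a).mp hb⟩
        · rintro ⟨a, ha, hb⟩; exact ⟨a, (hmg a).mpr ha, (hmt a).mpr hb⟩
      simp only [List.contains_eq_mem, beq_iff_eq, Bool.and_eq_true, List.all_eq_true,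
        List.any_eq_true, decide_eq_true_eq, hsub, hint]
      split_ifs <;> tauto
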